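-- pv_equiv track=rewrite | github.com/deep-dive-lou/humtech-platform | app/bot/monitor.py | _build_slack_message
-- ===== SOURCE A (Python) =====
-- MAX_ITEMS_PER_SECTION = 5
--
-- def _build_slack_message(sections: dict[str, list[dict]]) -> str:
--     """Build a plain mrkdwn message from alert sections."""
--     label_map = {
--         "high_turns": ":warning: *High Turn Count (no booking)*",
--         "wants_human": ":raised_hand: *Wants Human (unactioned)*",
--         "failed_sends": ":x: *Failed Message Sends*",
--         "repeated_unclear": ":question: *Repeated Unclear Intents*",
--         "stalled": ":hourglass: *Stalled Conversations*",
--         "job_backup": ":rotating_light: *Job Queue Backup*",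
--     }
--
--     parts: list[str] = []
--     for section_key, items in sections.items():
--         if not items:
--             continue
--         label = label_map.get(section_key, section_key)
--         lines = [label]
--         shown = items[:MAX_ITEMS_PER_SECTION]
--         overflow = len(items) - len(shown)
--
--         for item in shown:
--             if section_key == "high_turns":
--                 lines.append(f"  - {item['name']} -- {item['turns']} turns, last intent: {item['intent']}")
--             elif section_key == "wants_human":
--                 lines.append(f"  - {item['name']} -- waiting {item['waiting_mins']} min")
--             elif section_key == "failed_sends":
--                 lines.append(f"  - {item['name']} -- {item['error']}")
--             elif section_key == "repeated_unclear":
--                 lines.append(f"  - {item['name']} -- 3+ unclear in a row")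
--             elif section_key == "stalled":
--                 lines.append(f"  - {item['name']} -- {item['hours_waiting']}h since last message")
--             elif section_key == "job_backup":
--                 lines.append(f"  - {item['stuck_count']} jobs stuck in queue")
--
--         if overflow > 0:
--             lines.append(f"  _...and {overflow} more_")
--
--         parts.append("\n".join(lines))
--
--     return "\n\n".join(parts)
-- ===== SOURCE B (Python) =====
-- MAX_ITEMS_PER_SECTION = 5
--
-- # Each section key maps to (label, template); a template is a list of pieces:
-- # a plain string is a literal, a 1-tuple ("field",) is replaced by item["field"].
-- # One generic interpolation loop renders every section; there is no per-key code.
-- _SECTIONS = {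
--     "high_turns": (":warning: *High Turn Count (no booking)*",
--                    ["  - ", ("name",), " -- ", ("turns",), " turns, last intent: ", ("intent",)]),
--     "wants_human": (":raised_hand: *Wants Human (unactioned)*",
--                     ["  - ", ("name",), " -- waiting ", ("waiting_mins",), " min"]),
--     "failed_sends": (":x: *Failed Message Sends*",
--                      ["  - ", ("name",), " -- ", ("error",)]),
--     "repeated_unclear": (":question: *Repeated Unclear Intents*",
--                          ["  - ", ("name",), " -- 3+ unclear in a row"]),
--     "stalled": (":hourglass: *Stalled Conversations*",
--                 ["  - ", ("name",), " -- ", ("hours_waiting",), "h since last message"]),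
--     "job_backup": (":rotating_light: *Job Queue Backup*",
--                    ["  - ", ("stuck_count",), " jobs stuck in queue"]),
-- }
--
--
-- def _render(template, item):
--     out = ""
--     for part in template:
--         out += part if isinstance(part, str) else str(item[part[0]])
--     return out
--
--
-- def _section_text(key, items):
--     entry = _SECTIONS.get(key)
--     if entry is None:
--         label, body = key, []
--     else:
--         label, body = entry[0], [_render(entry[1], it) for it in items[:MAX_ITEMS_PER_SECTION]]
--     extra = len(items) - MAX_ITEMS_PER_SECTION
--     tail = [f"  _...and {extra} more_"] if extra > 0 else []
--     return "\n".join([label] + body + tail)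
--
--
-- def _build_slack_message(sections: dict) -> str:
--     """Build a plain mrkdwn message from alert sections."""
--     return "\n\n".join(
--         _section_text(key, items) for key, items in sections.items() if items
--     )
-- ===== Notes on version B (the rewrite author's own statement) =====
-- stated objective: simpler
-- what changed: Replaces A's six hard-coded per-item if/elif format branches by a generic template-interpolation engine: one table maps each key to (label, template) where a template is a list of literal/field tokens, and a single accumulator loop renders any section; the outer loop becomes a filter/map/join pipeline.
import Mathlib
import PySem

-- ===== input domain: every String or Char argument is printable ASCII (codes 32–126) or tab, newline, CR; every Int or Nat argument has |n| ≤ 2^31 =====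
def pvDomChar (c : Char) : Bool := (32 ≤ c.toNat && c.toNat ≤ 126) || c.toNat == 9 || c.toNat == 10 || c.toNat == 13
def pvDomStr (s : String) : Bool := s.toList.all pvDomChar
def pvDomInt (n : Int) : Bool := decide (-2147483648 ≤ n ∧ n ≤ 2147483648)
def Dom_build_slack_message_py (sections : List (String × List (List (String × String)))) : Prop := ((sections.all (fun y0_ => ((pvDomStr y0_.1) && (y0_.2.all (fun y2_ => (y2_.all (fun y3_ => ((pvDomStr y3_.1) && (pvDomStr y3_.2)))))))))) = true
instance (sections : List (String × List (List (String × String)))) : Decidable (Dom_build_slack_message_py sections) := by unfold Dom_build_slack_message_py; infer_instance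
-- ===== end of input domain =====

-- B replaces A's six hard-coded per-item format branches by a data-driven template
-- interpolation engine (templates as literal/field token lists) fed from one table
-- that also carries the labels (objective: simpler, formats as data not code).

-- item['k'] on the Python dict built from the item's pair list; total form, exact under Pre_
def pvDget (item : List (String × String)) (k : String) : String :=
  (PySem.Dict.ofList item).getD k ""

-- ===== PORT A =====
def build_slack_message_py (sections : List (String × List (List (String × String)))) : String :=
  let label_map : PySem.Dict String String := PySem.Dict.ofList
    [("high_turns", ":warning: *High Turn Count (no booking)*"),
     ("wants_human", ":raised_hand: *Wants Human (unactioned)*"),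
     ("failed_sends", ":x: *Failed Message Sends*"),
     ("repeated_unclear", ":question: *Repeated Unclear Intents*"),
     ("stalled", ":hourglass: *Stalled Conversations*"),
     ("job_backup", ":rotating_light: *Job Queue Backup*")]
  let parts : List String := (PySem.Dict.ofList sections).items.foldl (fun parts kv =>
    let section_key := kv.1
    let items := kv.2
    if items.isEmpty then parts
    else
      let label := label_map.getD section_key section_key
      let shown := PySem.List.slice items none (some 5)
      let overflow : Int := (items.length : Int) - (shown.length : Int)
      let lines : List String := shown.foldl (fun lines item =>
        if section_key == "high_turns" then
          lines ++ ["  - " ++ pvDget item "name" ++ " -- " ++ pvDget item "turns" ++ " turns, last intent: " ++ pvDget item "intent"]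
        else if section_key == "wants_human" then
          lines ++ ["  - " ++ pvDget item "name" ++ " -- waiting " ++ pvDget item "waiting_mins" ++ " min"]
        else if section_key == "failed_sends" then
          lines ++ ["  - " ++ pvDget item "name" ++ " -- " ++ pvDget item "error"]
        else if section_key == "repeated_unclear" then
          lines ++ ["  - " ++ pvDget item "name" ++ " -- 3+ unclear in a row"]
        else if section_key == "stalled" then
          lines ++ ["  - " ++ pvDget item "name" ++ " -- " ++ pvDget item "hours_waiting" ++ "h since last message"]
        else if section_key == "job_backup" then
          lines ++ ["  - " ++ pvDget item "stuck_count" ++ " jobs stuck in queue"]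
        else lines) [label]
      let lines := if overflow > 0 then lines ++ ["  _...and " ++ PySem.Int.toStr overflow ++ " more_"] else lines
      parts ++ [PySem.Str.join "\n" lines]) []
  PySem.Str.join "\n\n" parts

-- ===== PORT B =====
-- a template piece: a literal string or a field reference (Python: str vs 1-tuple)
inductive PvTok : Type
  | lit : String → PvTok
  | field : String → PvTok
deriving DecidableEq, Repr

-- the _SECTIONS table: key ↦ (label, template)
def pvSections : List (String × (String × List PvTok)) :=
  [("high_turns", (":warning: *High Turn Count (no booking)*",
      [.lit "  - ", .field "name", .lit " -- ", .field "turns", .lit " turns, last intent: ", .field "intent"])),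
   ("wants_human", (":raised_hand: *Wants Human (unactioned)*",
      [.lit "  - ", .field "name", .lit " -- waiting ", .field "waiting_mins", .lit " min"])),
   ("failed_sends", (":x: *Failed Message Sends*",
      [.lit "  - ", .field "name", .lit " -- ", .field "error"])),
   ("repeated_unclear", (":question: *Repeated Unclear Intents*",
      [.lit "  - ", .field "name", .lit " -- 3+ unclear in a row"])),
   ("stalled", (":hourglass: *Stalled Conversations*",
      [.lit "  - ", .field "name", .lit " -- ", .field "hours_waiting", .lit "h since last message"])),
   ("job_backup", (":rotating_light: *Job Queue Backup*",
      [.lit "  - ", .field "stuck_count", .lit " jobs stuck in queue"]))]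

-- _render: one generic interpolation accumulator loop
def pvRender (template : List PvTok) (item : List (String × String)) : String :=
  template.foldl (fun out part =>
    out ++ (match part with | .lit s => s | .field k => pvDget item k)) ""

-- _section_text
def pvAltSectionText (key : String) (items : List (List (String × String))) : String :=
  let lb : String × List String :=
    match pvSections.find? (fun p => p.1 == key) with
    | none => (key, [])
    | some e => (e.2.1, (items.take 5).map (pvRender e.2.2))
  let extra : Int := (items.length : Int) - 5
  let tail : List String := if extra > 0 then ["  _...and " ++ PySem.Int.toStr extra ++ " more_"] else []
  PySem.Str.join "\n" (lb.1 :: lb.2 ++ tail)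

def build_slack_message_py_alt (sections : List (String × List (List (String × String)))) : String :=
  PySem.Str.join "\n\n"
    (((PySem.Dict.ofList sections).items.filter (fun kv => !kv.2.isEmpty)).map
      (fun kv => pvAltSectionText kv.1 kv.2))

-- ===== PRECONDITION & SPEC =====
-- keys the formatter of a given section reads from each displayed item (independent of the ports)
def pvReqKeys (key : String) : List String :=
  if key == "high_turns" then ["name", "turns", "intent"]
  else if key == "wants_human" then ["name", "waiting_mins"]
  else if key == "failed_sends" then ["name", "error"]
  else if key == "repeated_unclear" then ["name"]
  else if key == "stalled" then ["name", "hours_waiting"]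
  else if key == "job_backup" then ["stuck_count"]
  else []

-- Pre_ excludes exactly the inputs where the Python A raises KeyError: some displayed item
-- (one of the first 5 of its section) lacks a field its section's formatter reads.
def Pre_build_slack_message_py (sections : List (String × List (List (String × String)))) : Prop :=
  ∀ kv ∈ (PySem.Dict.ofList sections).items, ∀ item ∈ kv.2.take 5,
    ∀ r ∈ pvReqKeys kv.1, r ∈ item.map Prod.fst
instance (sections : List (String × List (List (String × String)))) : Decidable (Pre_build_slack_message_py sections) := by unfold Pre_build_slack_message_py; infer_instance

def pvWitness_build_slack_message_py : (List (String × List (List (String × String)))) :=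
  [("high_turns", [[("name", "Ana"), ("turns", "7"), ("intent", "book")]]),
   ("job_backup", [[("stuck_count", "3")]]),
   ("other", [[("x", "y")]])]

def Spec_build_slack_message_py (sections : List (String × List (List (String × String)))) (out : String) : Prop := out = build_slack_message_py_alt sections
instance (sections : List (String × List (List (String × String)))) (out : String) : Decidable (Spec_build_slack_message_py sections out) := by unfold Spec_build_slack_message_py; infer_instance

-- ===== CLAIM (what is proved, stated in full; the proofs are below) =====
def Claim_equal_build_slack_message_py : Prop := ∀ (sections : List (String × List (List (String × String)))), Dom_build_slack_message_py sections → Pre_build_slack_message_py sections → Spec_build_slack_message_py sections (build_slack_message_py sections)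

-- ===== LEMMAS AND PROOFS =====

-- A's outer loop body, named for the proofs (definitionally the lambda inside build_slack_message_py)
def pvAStep (parts : List String) (kv : String × List (List (String × String))) : List String :=
  let section_key := kv.1
  let items := kv.2
  if items.isEmpty then parts
  else
    let label := (PySem.Dict.ofList
      [("high_turns", ":warning: *High Turn Count (no booking)*"),
     ("wants_human", ":raised_hand: *Wants Human (unactioned)*"),
     ("failed_sends", ":x: *Failed Message Sends*"),
     ("repeated_unclear", ":question: *Repeated Unclear Intents*"),
     ("stalled", ":hourglass: *Stalled Conversations*"),
     ("job_backup", ":rotating_light: *Job Queue Backup*")] : PySem.Dict String String).getD section_key section_key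
    let shown := PySem.List.slice items none (some 5)
    let overflow : Int := (items.length : Int) - (shown.length : Int)
    let lines : List String := shown.foldl (fun lines item =>
        if section_key == "high_turns" then
          lines ++ ["  - " ++ pvDget item "name" ++ " -- " ++ pvDget item "turns" ++ " turns, last intent: " ++ pvDget item "intent"]
        else if section_key == "wants_human" then
          lines ++ ["  - " ++ pvDget item "name" ++ " -- waiting " ++ pvDget item "waiting_mins" ++ " min"]
        else if section_key == "failed_sends" then
          lines ++ ["  - " ++ pvDget item "name" ++ " -- " ++ pvDget item "error"]
        else if section_key == "repeated_unclear" then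
          lines ++ ["  - " ++ pvDget item "name" ++ " -- 3+ unclear in a row"]
        else if section_key == "stalled" then
          lines ++ ["  - " ++ pvDget item "name" ++ " -- " ++ pvDget item "hours_waiting" ++ "h since last message"]
        else if section_key == "job_backup" then
          lines ++ ["  - " ++ pvDget item "stuck_count" ++ " jobs stuck in queue"]
        else lines) [label]
    let lines := if overflow > 0 then lines ++ ["  _...and " ++ PySem.Int.toStr overflow ++ " more_"] else lines
    parts ++ [PySem.Str.join "\n" lines]

-- A's if/elif chain appended for one item equals rendering B's template for that key
lemma pv_chain_eq (key : String) (item : List (String × String)) (lines : List String) :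
    (
        if key == "high_turns" then
          lines ++ ["  - " ++ pvDget item "name" ++ " -- " ++ pvDget item "turns" ++ " turns, last intent: " ++ pvDget item "intent"]
        else if key == "wants_human" then
          lines ++ ["  - " ++ pvDget item "name" ++ " -- waiting " ++ pvDget item "waiting_mins" ++ " min"]
        else if key == "failed_sends" then
          lines ++ ["  - " ++ pvDget item "name" ++ " -- " ++ pvDget item "error"]
        else if key == "repeated_unclear" then
          lines ++ ["  - " ++ pvDget item "name" ++ " -- 3+ unclear in a row"]
        else if key == "stalled" then
          lines ++ ["  - " ++ pvDget item "name" ++ " -- " ++ pvDget item "hours_waiting" ++ "h since last message"]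
        else if key == "job_backup" then
          lines ++ ["  - " ++ pvDget item "stuck_count" ++ " jobs stuck in queue"]
        else lines)
    = lines ++ (match pvSections.find? (fun p => p.1 == key) with
        | none => []
        | some e => [pvRender e.2.2 item]) := by
  simp only [pvSections, List.find?, beq_iff_eq]
  split_ifs with h1 h2 h3 h4 h5 h6 <;>
    [ (subst h1; simp [pvRender]); (subst h2; simp [pvRender]); (subst h3; simp [pvRender]);
      (subst h4; simp [pvRender]); (subst h5; simp [pvRender]); (subst h6; simp [pvRender]);
      (simp [beq_eq_false_iff_ne.mpr (Ne.symm h1), beq_eq_false_iff_ne.mpr (Ne.symm h2),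
             beq_eq_false_iff_ne.mpr (Ne.symm h3), beq_eq_false_iff_ne.mpr (Ne.symm h4),
             beq_eq_false_iff_ne.mpr (Ne.symm h5), beq_eq_false_iff_ne.mpr (Ne.symm h6)])]

-- A's inner accumulator loop over the shown items equals B's template-render map
lemma pv_foldl_chain (key : String) (shown : List (List (String × String))) (init : List String) :
    shown.foldl (fun lines item =>
        if key == "high_turns" then
          lines ++ ["  - " ++ pvDget item "name" ++ " -- " ++ pvDget item "turns" ++ " turns, last intent: " ++ pvDget item "intent"]
        else if key == "wants_human" then
          lines ++ ["  - " ++ pvDget item "name" ++ " -- waiting " ++ pvDget item "waiting_mins" ++ " min"]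
        else if key == "failed_sends" then
          lines ++ ["  - " ++ pvDget item "name" ++ " -- " ++ pvDget item "error"]
        else if key == "repeated_unclear" then
          lines ++ ["  - " ++ pvDget item "name" ++ " -- 3+ unclear in a row"]
        else if key == "stalled" then
          lines ++ ["  - " ++ pvDget item "name" ++ " -- " ++ pvDget item "hours_waiting" ++ "h since last message"]
        else if key == "job_backup" then
          lines ++ ["  - " ++ pvDget item "stuck_count" ++ " jobs stuck in queue"]
        else lines) init
    = init ++ (match pvSections.find? (fun p => p.1 == key) with
        | none => []
        | some e => shown.map (pvRender e.2.2)) := by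
  induction shown generalizing init with
  | nil => cases h : pvSections.find? (fun p => p.1 == key) <;> simp
  | cons a l ih =>
    rw [List.foldl_cons, pv_chain_eq, ih]
    cases h : pvSections.find? (fun p => p.1 == key) <;> simp

-- label_map.get(key, key) (a dict literal) equals the label slot of B's table lookup
lemma pv_label_eq (key : String) :
    (PySem.Dict.ofList
      [("high_turns", ":warning: *High Turn Count (no booking)*"),
     ("wants_human", ":raised_hand: *Wants Human (unactioned)*"),
     ("failed_sends", ":x: *Failed Message Sends*"),
     ("repeated_unclear", ":question: *Repeated Unclear Intents*"),
     ("stalled", ":hourglass: *Stalled Conversations*"),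
     ("job_backup", ":rotating_light: *Job Queue Backup*")] : PySem.Dict String String).getD key key
      = ((pvSections.find? (fun p => p.1 == key)).map (fun e => e.2.1)).getD key := by
  by_cases h1 : key = "high_turns"; · subst h1; rfl
  by_cases h2 : key = "wants_human"; · subst h2; rfl
  by_cases h3 : key = "failed_sends"; · subst h3; rfl
  by_cases h4 : key = "repeated_unclear"; · subst h4; rfl
  by_cases h5 : key = "stalled"; · subst h5; rfl
  by_cases h6 : key = "job_backup"; · subst h6; rfl
  have h : (PySem.Dict.ofList
      [("high_turns", ":warning: *High Turn Count (no booking)*"),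
     ("wants_human", ":raised_hand: *Wants Human (unactioned)*"),
     ("failed_sends", ":x: *Failed Message Sends*"),
     ("repeated_unclear", ":question: *Repeated Unclear Intents*"),
     ("stalled", ":hourglass: *Stalled Conversations*"),
     ("job_backup", ":rotating_light: *Job Queue Backup*")] : PySem.Dict String String).items
      = [("high_turns", ":warning: *High Turn Count (no booking)*"),
     ("wants_human", ":raised_hand: *Wants Human (unactioned)*"),
     ("failed_sends", ":x: *Failed Message Sends*"),
     ("repeated_unclear", ":question: *Repeated Unclear Intents*"),
     ("stalled", ":hourglass: *Stalled Conversations*"),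
     ("job_backup", ":rotating_light: *Job Queue Backup*")] := by rfl
  simp [PySem.Dict.getD, PySem.Dict.get?, h, pvSections, List.find?,
        beq_eq_false_iff_ne.mpr (Ne.symm h1), beq_eq_false_iff_ne.mpr (Ne.symm h2),
        beq_eq_false_iff_ne.mpr (Ne.symm h3), beq_eq_false_iff_ne.mpr (Ne.symm h4),
        beq_eq_false_iff_ne.mpr (Ne.symm h5), beq_eq_false_iff_ne.mpr (Ne.symm h6)]

-- one step of A's outer loop appends B's section text exactly when the section is nonempty
lemma pv_step_eq (parts : List String) (kv : String × List (List (String × String))) :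
    pvAStep parts kv
      = if kv.2.isEmpty then parts else parts ++ [pvAltSectionText kv.1 kv.2] := by
  by_cases h : kv.2.isEmpty
  · simp [pvAStep, h]
  · simp only [pvAStep]
    rw [if_neg h]
    rw [PySem.List.slice_to kv.2 (by norm_num : (0 : Int) ≤ 5)]
    rw [pv_foldl_chain kv.1]
    have hl := pv_label_eq kv.1
    simp only [pvAltSectionText, show Int.toNat 5 = 5 from rfl, if_neg h]
    have htk : ((kv.2.take 5).length : Int) = min 5 (kv.2.length : Int) := by
      simp [List.length_take]
    rw [hl]
    split_ifs with c1 c2 c2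
    · have hov : (kv.2.length : Int) - ((kv.2.take 5).length : Int) = (kv.2.length : Int) - 5 := by
        omega
      rw [hov]
      cases hfind : pvSections.find? (fun p => p.1 == kv.1) <;> simp
    · exfalso; omega
    · exfalso; omega
    · cases hfind : pvSections.find? (fun p => p.1 == kv.1) <;> simp

-- the whole outer loop equals B's filter/map pipeline
lemma pv_parts_eq (l : List (String × List (List (String × String)))) (acc : List String) :
    l.foldl pvAStep acc
      = acc ++ (l.filter (fun kv => !kv.2.isEmpty)).map (fun kv => pvAltSectionText kv.1 kv.2) := by
  have hf : pvAStep = fun acc kv =>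
      if (!kv.2.isEmpty) = true then acc ++ [pvAltSectionText kv.1 kv.2] else acc := by
    funext acc kv
    rw [pv_step_eq]
    by_cases h : kv.2.isEmpty <;> simp [h]
  rw [hf, PySem.List.foldl_append_if]

-- ===== VERDICT (by name: the statement is the Claim_ definition above) =====
theorem build_slack_message_py_spec : Claim_equal_build_slack_message_py := by
  intro sections _ _
  show build_slack_message_py sections = build_slack_message_py_alt sections
  have hA : build_slack_message_py sections
      = PySem.Str.join "\n\n" (((PySem.Dict.ofList sections).items).foldl pvAStep []) := rfl
  rw [hA, pv_parts_eq]
  simp [build_slack_message_py_alt]
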